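-- pv_equiv track=rewrite | github.com/ikhanhmai/python-assignment | matrices_multiplication.py | validate_matrix
-- ===== SOURCE A (Python) =====
-- def validate_matrix(matrix):
--   m = len(matrix)
--   if(m == 0):
--     return False
--   n = len(matrix[0])
--   for i in range(m):
--     if not len(matrix[i]) == n:
--        return False
--   return True
-- ===== SOURCE B (Python) =====
-- def validate_matrix(matrix):
--     lengths = {len(row) for row in matrix}
--     return len(matrix) > 0 and len(lengths) == 1
-- ===== Notes on version B (the rewrite author's own statement) =====
-- stated objective: idiomatic
-- what changed: Collects the distinct row lengths into a set in one comprehension and decides by a cardinality check (nonempty and exactly one distinct length), instead of comparing every row against the first row's length with an early return.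
import Mathlib
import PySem

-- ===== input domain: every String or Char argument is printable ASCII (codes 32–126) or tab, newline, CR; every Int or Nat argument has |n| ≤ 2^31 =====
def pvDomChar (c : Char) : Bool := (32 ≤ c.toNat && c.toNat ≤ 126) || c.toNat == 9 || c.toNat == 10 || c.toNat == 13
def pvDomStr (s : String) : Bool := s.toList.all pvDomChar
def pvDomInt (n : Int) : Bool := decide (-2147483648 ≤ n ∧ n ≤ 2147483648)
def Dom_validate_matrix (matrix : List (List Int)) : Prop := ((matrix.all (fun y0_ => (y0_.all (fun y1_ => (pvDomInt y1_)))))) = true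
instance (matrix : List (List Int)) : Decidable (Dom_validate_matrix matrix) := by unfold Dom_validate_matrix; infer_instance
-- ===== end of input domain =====

-- B collects the distinct row lengths into a set and decides by a cardinality check, instead of A's early-return scan against the first row's length (idiomatic; same cost).

-- ===== PORT A =====
-- the 'for i in range(m): if not len(matrix[i]) == n: return False' loop, as structural recursion over the rows
def vmLoopA (n : Nat) : List (List Int) → Bool
  | [] => true
  | r :: rs => if ¬ (r.length = n) then false else vmLoopA n rs

def validate_matrix (matrix : List (List Int)) : Bool :=
  let m := matrix.length
  if m = 0 then false
  else
    let n := (matrix.headD []).length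
    vmLoopA n matrix

-- ===== PORT B =====
def validate_matrix_alt (matrix : List (List Int)) : Bool :=
  let lengths : PySem.Set Int := PySem.Set.ofList (matrix.map (fun row => (row.length : Int)))
  decide (matrix.length > 0) && decide (PySem.Set.len lengths = 1)

-- ===== PRECONDITION & SPEC =====
def Spec_validate_matrix (matrix : List (List Int)) (out : Bool) : Prop := out = validate_matrix_alt matrix
instance (matrix : List (List Int)) (out : Bool) : Decidable (Spec_validate_matrix matrix out) := by unfold Spec_validate_matrix; infer_instance

-- ===== CLAIM (what is proved, stated in full; the proofs are below) =====
def Claim_equal_validate_matrix : Prop := ∀ (matrix : List (List Int)), Dom_validate_matrix matrix → Spec_validate_matrix matrix (validate_matrix matrix)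

-- ===== LEMMAS AND PROOFS =====

theorem vmLoopA_eq_true_iff (n : Nat) (l : List (List Int)) :
    vmLoopA n l = true ↔ ∀ r ∈ l, r.length = n := by
  induction l with
  | nil => simp [vmLoopA]
  | cons r rs ih => by_cases h : r.length = n <;> simp [vmLoopA, h, ih]

theorem foldl_add_const (a : Int) (xs : List Int) (h : ∀ x ∈ xs, x = a) :
    xs.foldl PySem.Set.add [a] = [a] := by
  induction xs with
  | nil => rfl
  | cons x xs ih =>
    have hx := h x (by simp)
    have : PySem.Set.add [a] x = [a] := by
      simp [PySem.Set.add, hx, PySem.Set.contains]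
    simp only [List.foldl_cons, this]
    exact ih (fun y hy => h y (by simp [hy]))

theorem ofList_cons_const (a : Int) (xs : List Int) (h : ∀ x ∈ xs, x = a) :
    PySem.Set.ofList (a :: xs) = [a] := by
  rw [show PySem.Set.ofList (a :: xs) = xs.foldl PySem.Set.add [a] from rfl]
  exact foldl_add_const a xs h

theorem len_ofList_ne_one (a x : Int) (xs : List Int) (hx : x ∈ xs) (hne : x ≠ a) :
    PySem.Set.len (PySem.Set.ofList (a :: xs)) ≠ 1 := by
  intro h1
  have ha : a ∈ PySem.Set.ofList (a :: xs) := by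
    rw [PySem.Set.mem_ofList]; simp
  have hxm : x ∈ PySem.Set.ofList (a :: xs) := by
    rw [PySem.Set.mem_ofList]; simp [hx]
  have hlen : (PySem.Set.ofList (a :: xs)).length = 1 := by
    simpa [PySem.Set.len] using h1
  obtain ⟨b, hb⟩ := List.length_eq_one_iff.mp hlen
  rw [hb] at ha hxm
  simp at ha hxm
  exact hne (hxm.trans ha.symm)

theorem validate_matrix_eq (matrix : List (List Int)) :
    validate_matrix matrix = validate_matrix_alt matrix := by
  cases matrix with
  | nil => rfl
  | cons r rs =>
    by_cases h : ∀ x ∈ rs, x.length = r.length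
    · have hA : validate_matrix (r :: rs) = true := by
        simp only [validate_matrix]
        rw [if_neg (by simp)]
        simp only [List.headD_cons]
        exact (vmLoopA_eq_true_iff r.length (r :: rs)).mpr
          (by intro x hx; rcases List.mem_cons.mp hx with hx | hx
              · simp [hx]
              · exact h x hx)
      have hconst : ∀ y ∈ rs.map (fun row => ((row.length : Int))), y = (r.length : Int) := by
        intro y hy
        simp only [List.mem_map] at hy
        obtain ⟨row, hrow, rfl⟩ := hy
        exact_mod_cast h row hrow
      have hB : validate_matrix_alt (r :: rs) = true := by
        simp only [validate_matrix_alt, List.map_cons]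
        simp only [ofList_cons_const _ _ hconst]
        simp [PySem.Set.len]
      rw [hA, hB]
    · rw [not_forall] at h
      simp only [not_forall, exists_prop] at h
      obtain ⟨x, hx, hne⟩ := h
      have hA : validate_matrix (r :: rs) = false := by
        simp only [validate_matrix]
        rw [if_neg (by simp)]
        simp only [List.headD_cons]
        cases hv : vmLoopA r.length (r :: rs) with
        | false => rfl
        | true =>
          exact absurd ((vmLoopA_eq_true_iff r.length (r :: rs)).mp hv x (by simp [hx])) hne
      have hB : validate_matrix_alt (r :: rs) = false := by
        simp only [validate_matrix_alt, List.map_cons]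
        have := len_ofList_ne_one (r.length : Int) (x.length : Int)
          (rs.map (fun row => ((row.length : Int)))) (by simp; exact ⟨x, hx, rfl⟩)
          (by exact_mod_cast hne)
        simp only [Bool.and_eq_false_iff, decide_eq_false_iff_not]
        exact Or.inr this
      rw [hA, hB]

-- ===== VERDICT (by name: the statement is the Claim_ definition above) =====
theorem validate_matrix_spec : Claim_equal_validate_matrix := by
  intro matrix _
  exact validate_matrix_eq matrix
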